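-- pv_equiv track=rewrite | github.com/bdoncer/ASD | graphs/extra/bit_algo/bit_miasta.py | obetnij_to_gowno
-- ===== SOURCE A (Python) =====
-- def obetnij_to_gowno(G,miasta):
--     def DFS_visit(G, i):
--         res = miasta[i]
--         visited[i] = True
--         for neigh in G[i]:
--             if visited[neigh] == False:
--                 res = DFS_visit(G, neigh) or res
--         if res == False:
--             zniszczenie[i] = True
--         return res
--     n = len(G)
--     visited = [False] * n
--     zniszczenie = [False] * n
--     DFS_visit(G, 0)
--     return zniszczenie
-- ===== SOURCE B (Python) =====
-- def obetnij_to_gowno(G, miasta):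
--     n = len(G)
--     visited = [False] * n
--     zniszczenie = [False] * n
--     visited[0] = True
--     stack = [(0, list(G[0]), miasta[0])]
--     while stack:
--         i, rest, res = stack.pop()
--         if rest:
--             neigh, tl = rest[0], rest[1:]
--             if not visited[neigh]:
--                 visited[neigh] = True
--                 stack.append((i, tl, res))
--                 stack.append((neigh, list(G[neigh]), miasta[neigh]))
--             else:
--                 stack.append((i, tl, res))
--         else:
--             if not res:
--                 zniszczenie[i] = True
--             if stack:
--                 j, l, r = stack.pop()
--                 stack.append((j, l, r or res))
--     return zniszczenie
-- ===== Notes on version B (the rewrite author's own statement) =====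
-- stated objective: alternative
-- what changed: The recursive DFS_visit (closure mutating enclosing arrays) is replaced by an iterative DFS with an explicit stack of (node, remaining-neighbours, subtree-result) frames; visited is marked on push and the OR of subtree results is folded into the parent frame at pop time, reproducing the same DFS tree and postorder aggregation without recursion.
-- outside the precondition, e.g. on obetnij_to_gowno([[0], [5]], [True, True]): A returns [False, False], B returns [False, False]; on obetnij_to_gowno([[0], []], [True]): A returns [False, False], B returns [False, False]
import Mathlib
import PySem

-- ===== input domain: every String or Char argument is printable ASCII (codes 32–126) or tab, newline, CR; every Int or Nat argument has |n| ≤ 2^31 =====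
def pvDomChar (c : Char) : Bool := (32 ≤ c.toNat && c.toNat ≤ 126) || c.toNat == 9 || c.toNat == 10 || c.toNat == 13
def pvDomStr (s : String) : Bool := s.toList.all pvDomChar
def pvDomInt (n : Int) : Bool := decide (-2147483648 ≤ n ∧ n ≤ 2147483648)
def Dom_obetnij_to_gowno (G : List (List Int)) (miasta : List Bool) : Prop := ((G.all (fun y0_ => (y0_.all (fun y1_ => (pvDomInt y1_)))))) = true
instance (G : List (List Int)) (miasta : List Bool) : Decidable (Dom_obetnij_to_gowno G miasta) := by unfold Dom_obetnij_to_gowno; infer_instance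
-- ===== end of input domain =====

-- B replaces the recursive DFS_visit by an explicit-stack iterative DFS (same DFS tree,
-- visited marked on push, subtree results OR-folded into the parent frame on pop); alternative
-- decomposition, no speed claim.


-- ===== PORT A =====
-- recursive DFS_visit; the fuel argument is only a totality guard (n+1 suffices: each call
-- marks a previously unvisited node).
mutual
def dfsA (G : List (List Int)) (m : List Bool) : Nat → List Bool → List Bool → Int → List Bool × List Bool × Bool
  | 0, v, z, _ => (v, z, false)
  | f+1, v, z, i =>
    let res := PySem.List.pyGetD m i false                 -- res = miasta[i]
    let v1 := PySem.List.pySetD v i true                   -- visited[i] = True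
    let r := loopA G m f v1 z (PySem.List.pyGetD G i []) res
    let z1 := if r.2.2 = false then PySem.List.pySetD r.2.1 i true else r.2.1
    (r.1, z1, r.2.2)
  termination_by f _ _ _ => (f, 0)
def loopA (G : List (List Int)) (m : List Bool) : Nat → List Bool → List Bool → List Int → Bool → List Bool × List Bool × Bool
  | _, v, z, [], res => (v, z, res)
  | f, v, z, neigh :: tl, res =>
    if PySem.List.pyGetD v neigh false = false then        -- if visited[neigh] == False
      let r := dfsA G m f v z neigh
      loopA G m f r.1 r.2.1 tl (r.2.2 || res)              -- res = DFS_visit(G, neigh) or res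
    else loopA G m f v z tl res
  termination_by f _ _ l _ => (f, l.length + 1)
end

def obetnij_to_gowno (G : List (List Int)) (miasta : List Bool) : List Bool :=
  let n := G.length
  let visited := List.replicate n false
  let zniszczenie := List.replicate n false
  (dfsA G miasta (n + 1) visited zniszczenie 0).2.1

-- ===== PORT B =====
-- explicit-stack machine; frames are (node, remaining neighbours, res); fuel is only a
-- totality guard for the while loop (the chosen bound suffices inside Pre_).
def runB (G : List (List Int)) (m : List Bool) : Nat → List Bool → List Bool → List (Int × List Int × Bool) → List Bool × List Bool
  | 0, v, z, _ => (v, z)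
  | _+1, v, z, [] => (v, z)
  | f+1, v, z, (i, [], res) :: stk =>
    let z1 := if res = false then PySem.List.pySetD z i true else z
    runB G m f v z1 (match stk with
      | [] => []
      | (j, l, r) :: tl => (j, l, r || res) :: tl)
  | f+1, v, z, (i, neigh :: tl, res) :: stk =>
    if PySem.List.pyGetD v neigh false = false then
      runB G m f (PySem.List.pySetD v neigh true) z
        ((neigh, PySem.List.pyGetD G neigh [], PySem.List.pyGetD m neigh false) :: (i, tl, res) :: stk)
    else runB G m f v z ((i, tl, res) :: stk)

def obetnij_to_gowno_alt (G : List (List Int)) (miasta : List Bool) : List Bool :=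
  let n := G.length
  let visited := PySem.List.pySetD (List.replicate n false) 0 true
  let zniszczenie := List.replicate n false
  let esum := (G.map List.length).sum
  (runB G miasta (n * (2 * esum + 3) + 2 * esum + 1) visited zniszczenie
      [(0, PySem.List.pyGetD G 0 [], PySem.List.pyGetD miasta 0 false)]).2

-- ===== PRECONDITION & SPEC =====
-- Pre_ excludes the shapes on which A's indexing can raise IndexError — empty G, miasta
-- shorter than G, or a neighbour outside [-n, n); the bound is per input shape, so a few
-- inputs whose offending parts are unreachable (and on which A returns) are excluded too.
def Pre_obetnij_to_gowno (G : List (List Int)) (miasta : List Bool) : Prop :=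
  0 < G.length ∧ G.length ≤ miasta.length ∧
    ∀ row ∈ G, ∀ j ∈ row, -(G.length : Int) ≤ j ∧ j < (G.length : Int)
instance (G : List (List Int)) (miasta : List Bool) : Decidable (Pre_obetnij_to_gowno G miasta) := by
  unfold Pre_obetnij_to_gowno; infer_instance

def pvWitness_obetnij_to_gowno : List (List Int) × List Bool := ([[1, -1], [0]], [false, true])

def Spec_obetnij_to_gowno (G : List (List Int)) (miasta : List Bool) (out : List Bool) : Prop := out = obetnij_to_gowno_alt G miasta
instance (G : List (List Int)) (miasta : List Bool) (out : List Bool) : Decidable (Spec_obetnij_to_gowno G miasta out) := by unfold Spec_obetnij_to_gowno; infer_instance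

-- ===== CLAIM (what is proved, stated in full; the proofs are below) =====
def Claim_equal_obetnij_to_gowno : Prop := ∀ (G : List (List Int)) (miasta : List Bool), Dom_obetnij_to_gowno G miasta → Pre_obetnij_to_gowno G miasta → Spec_obetnij_to_gowno G miasta (obetnij_to_gowno G miasta)

-- ===== LEMMAS AND PROOFS =====

-- notions used by the simulation proof
def InRj (n : Nat) (j : Int) : Prop := -(n : Int) ≤ j ∧ j < (n : Int)
def RowsOK (G : List (List Int)) : Prop := ∀ row ∈ G, ∀ j ∈ row, InRj G.length j
def RestOK (n : Nat) (l : List Int) : Prop := ∀ j ∈ l, InRj n j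
def StkOK (n : Nat) (stk : List (Int × List Int × Bool)) : Prop := ∀ fr ∈ stk, RestOK n fr.2.1
def stkW (stk : List (Int × List Int × Bool)) : Nat := stk.foldr (fun fr a => 2 * fr.2.1.length + 1 + a) 0
def Wt (G : List (List Int)) : Nat := 2 * (G.map List.length).sum + 3
def Bnd (G : List (List Int)) (v : List Bool) (stk : List (Int × List Int × Bool)) : Nat :=
  v.count false * Wt G + stkW stk
def pushRes (stk : List (Int × List Int × Bool)) (b : Bool) : List (Int × List Int × Bool) :=
  match stk with
  | [] => []
  | (j, l, r) :: tl => (j, l, r || b) :: tl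


-- index / count primitives -----------------------------------------------------------------
theorem pv_idx_spec (n : Nat) (i : Int) (h1 : -(n : Int) ≤ i) (h2 : i < (n : Int)) :
    ∃ r : Nat, PySem.List.pyIdx? n i = some r ∧ r < n := by
  unfold PySem.List.pyIdx?
  by_cases hpos : 0 ≤ i
  · rw [if_pos hpos, if_pos h2]
    exact ⟨i.toNat, rfl, by omega⟩
  · rw [if_neg hpos, if_pos h1]
    exact ⟨n - (-i).toNat, rfl, by omega⟩

theorem pv_count_set (v : List Bool) (r : Nat) (h : r < v.length) (hf : v[r] = false) :
    (v.set r true).count false + 1 = v.count false := by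
  induction v generalizing r with
  | nil => simp at h
  | cons a tl ih =>
    cases r with
    | zero => simp_all
    | succ r =>
      simp only [List.set, List.count_cons]
      have := ih r (by simpa using h) (by simpa using hf)
      omega

theorem pv_count_set_le (v : List Bool) (r : Nat) :
    (v.set r true).count false ≤ v.count false := by
  induction v generalizing r with
  | nil => simp
  | cons a tl ih =>
    cases r with
    | zero => simp [List.count_cons]
    | succ r => simp only [List.set, List.count_cons]; have := ih r; omega

theorem pv_setD_len (v : List Bool) (i : Int) (b : Bool) :
    (PySem.List.pySetD v i b).length = v.length := by
  unfold PySem.List.pySetD PySem.List.pySet?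
  cases PySem.List.pyIdx? v.length i <;> simp

theorem pv_setD_count_le (v : List Bool) (i : Int) :
    (PySem.List.pySetD v i true).count false ≤ v.count false := by
  unfold PySem.List.pySetD PySem.List.pySet?
  cases h : PySem.List.pyIdx? v.length i with
  | none => simp
  | some r => simpa using pv_count_set_le v r

theorem pv_setD_count (v : List Bool) (i : Int) (h : InRj v.length i)
    (hb : PySem.List.pyGetD v i false = false) :
    (PySem.List.pySetD v i true).count false + 1 = v.count false := by
  obtain ⟨r, hr, hrn⟩ := pv_idx_spec v.length i h.1 h.2
  have hget : v[r] = false := by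
    unfold PySem.List.pyGetD PySem.List.pyGet? at hb
    rw [hr] at hb
    rwa [Option.bind_some, List.getElem?_eq_getElem hrn, Option.getD_some] at hb
  unfold PySem.List.pySetD PySem.List.pySet?
  rw [hr]
  simpa using pv_count_set v r hrn hget

theorem pv_count_pos (v : List Bool) (i : Int) (h : InRj v.length i)
    (hb : PySem.List.pyGetD v i false = false) : 1 ≤ v.count false := by
  have := pv_setD_count v i h hb
  omega

-- stack-weight facts ------------------------------------------------------------------------
theorem pv_stkW_zero (stk : List (Int × List Int × Bool)) (h : stkW stk = 0) : stk = [] := by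
  cases stk with
  | nil => rfl
  | cons fr tl => exfalso; simp only [stkW, List.foldr] at h; omega

theorem pv_stkW_cons (fr : Int × List Int × Bool) (tl : List (Int × List Int × Bool)) :
    stkW (fr :: tl) = 2 * fr.2.1.length + 1 + stkW tl := rfl

theorem pv_stkW_pushRes (stk : List (Int × List Int × Bool)) (b : Bool) :
    stkW (pushRes stk b) = stkW stk := by
  cases stk with
  | nil => rfl
  | cons fr tl => obtain ⟨j, l, r⟩ := fr; rfl

theorem pv_stkOK_pushRes (n : Nat) (stk : List (Int × List Int × Bool)) (b : Bool)
    (h : StkOK n stk) : StkOK n (pushRes stk b) := by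
  cases stk with
  | nil => simpa [pushRes] using h
  | cons fr tl =>
    obtain ⟨j, l, r⟩ := fr
    intro fr' hfr'
    rcases List.mem_cons.mp hfr' with h1 | h2
    · subst h1; exact h (j, l, r) (List.mem_cons_self)
    · exact h fr' (List.mem_cons_of_mem _ h2)

theorem pv_row_mem (G : List (List Int)) (i : Int) (h : InRj G.length i) :
    PySem.List.pyGetD G i [] ∈ G := by
  obtain ⟨r, hr, hrn⟩ := pv_idx_spec G.length i h.1 h.2
  unfold PySem.List.pyGetD PySem.List.pyGet?
  rw [hr, Option.bind_some, List.getElem?_eq_getElem hrn, Option.getD_some]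
  exact List.getElem_mem hrn

theorem pv_row_le (G : List (List Int)) (row : List Int) (h : row ∈ G) :
    row.length ≤ (G.map List.length).sum := by
  induction G with
  | nil => simp at h
  | cons a tl ih =>
    rcases List.mem_cons.mp h with h | h
    · subst h; simp
    · have := ih h; simp; omega

theorem pv_runB_nil (G : List (List Int)) (m : List Bool) (f : Nat) (v z : List Bool) :
    runB G m f v z [] = (v, z) := by
  cases f <;> simp [runB]


-- monotonicity of the recursive DFS: length preserved, count of unvisited non-increasing ----
theorem pv_mono (G : List (List Int)) (m : List Bool) : ∀ f : Nat,
    (∀ (v z : List Bool) (i : Int),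
      (dfsA G m f v z i).1.length = v.length ∧ (dfsA G m f v z i).1.count false ≤ v.count false) ∧
    (∀ (l : List Int) (v z : List Bool) (res : Bool),
      (loopA G m f v z l res).1.length = v.length ∧
        (loopA G m f v z l res).1.count false ≤ v.count false) := by
  intro f
  induction f with
  | zero =>
    constructor
    · intro v z i; simp [dfsA]
    · intro l
      induction l with
      | nil => intro v z res; simp [loopA]
      | cons neigh tl ih =>
        intro v z res
        simp only [loopA, dfsA]
        split
        · exact ih v z (false || res)
        · exact ih v z res
  | succ f ih =>
    have hd : ∀ (v z : List Bool) (i : Int),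
        (dfsA G m (f + 1) v z i).1.length = v.length ∧
          (dfsA G m (f + 1) v z i).1.count false ≤ v.count false := by
      intro v z i
      simp only [dfsA]
      have h1 := ih.2 (PySem.List.pyGetD G i []) (PySem.List.pySetD v i true) z
        (PySem.List.pyGetD m i false)
      refine ⟨by rw [h1.1, pv_setD_len], ?_⟩
      exact le_trans h1.2 (pv_setD_count_le v i)
    refine ⟨hd, ?_⟩
    intro l
    induction l with
    | nil => intro v z res; simp [loopA]
    | cons neigh tl ihl =>
      intro v z res
      simp only [loopA]
      split
      · have h1 := hd v z neigh
        have h2 := ihl (dfsA G m (f + 1) v z neigh).1 (dfsA G m (f + 1) v z neigh).2.1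
          ((dfsA G m (f + 1) v z neigh).2.2 || res)
        exact ⟨by rw [h2.1, h1.1], le_trans h2.2 h1.2⟩
      · exact ihl v z res

-- the accumulated res only ORs onto the result of the loop ---------------------------------
theorem pv_loop_or (G : List (List Int)) (m : List Bool) (f : Nat) :
    ∀ (l : List Int) (v z : List Bool) (res : Bool),
      loopA G m f v z l res =
        ((loopA G m f v z l false).1, (loopA G m f v z l false).2.1,
          (loopA G m f v z l false).2.2 || res) := by
  intro l
  induction l with
  | nil => intro v z res; simp [loopA]
  | cons neigh tl ih =>
    intro v z res
    simp only [loopA]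
    split
    · rw [ih _ _ ((dfsA G m f v z neigh).2.2 || res), ih _ _ ((dfsA G m f v z neigh).2.2 || false)]
      simp [Bool.or_assoc]
    · exact ih v z res


-- fuel irrelevance of the machine above the step bound --------------------------------------
theorem pv_runB_succ (G : List (List Int)) (m : List Bool) :
    ∀ (f : Nat) (v z : List Bool) (stk : List (Int × List Int × Bool)),
      v.length = G.length → RowsOK G → StkOK G.length stk → Bnd G v stk ≤ f →
      runB G m (f + 1) v z stk = runB G m f v z stk := by
  intro f
  induction f with
  | zero =>
    intro v z stk hv hG hS hB
    have hstk : stk = [] := by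
      apply pv_stkW_zero
      have : stkW stk ≤ Bnd G v stk := by unfold Bnd; omega
      omega
    subst hstk
    simp [pv_runB_nil]
  | succ f ih =>
    intro v z stk hv hG hS hB
    cases stk with
    | nil => simp [pv_runB_nil]
    | cons fr stk' =>
      obtain ⟨i, rest, res⟩ := fr
      cases rest with
      | nil =>
        simp only [runB]
        apply ih
        · exact hv
        · exact hG
        · exact pv_stkOK_pushRes G.length stk' res (fun fr hfr => hS fr (List.mem_cons_of_mem _ hfr))
        · have h1 : stkW (pushRes stk' res) = stkW stk' := pv_stkW_pushRes stk' res
          have h2 : stkW ((i, ([] : List Int), res) :: stk') = 1 + stkW stk' := by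
            simp [pv_stkW_cons]
          unfold Bnd at hB ⊢
          show v.count false * Wt G + stkW (pushRes stk' res) ≤ f
          omega
      | cons neigh tl =>
        have hneigh : InRj G.length neigh :=
          hS (i, neigh :: tl, res) (List.mem_cons_self) neigh (List.mem_cons_self)
        simp only [runB]
        split
        · -- push an unvisited neighbour
          rename_i hb
          apply ih
          · rw [pv_setD_len]; exact hv
          · exact hG
          · intro fr hfr
            rcases List.mem_cons.mp hfr with h1 | h1
            · subst h1
              have hrow := pv_row_mem G neigh hneigh
              intro j hj
              exact hG _ hrow j hj
            · rcases List.mem_cons.mp h1 with h2 | h2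
              · subst h2
                intro j hj
                exact hS (i, neigh :: tl, res) (List.mem_cons_self) j (List.mem_cons_of_mem _ hj)
              · exact hS fr (List.mem_cons_of_mem _ h2)
          · -- bound decreases
            have hcnt : (PySem.List.pySetD v neigh true).count false + 1 = v.count false :=
              pv_setD_count v neigh (by rwa [hv]) (by assumption)
            have hrowle : (PySem.List.pyGetD G neigh []).length ≤ (G.map List.length).sum :=
              pv_row_le G _ (pv_row_mem G neigh hneigh)
            have hmul : v.count false * Wt G =
                (PySem.List.pySetD v neigh true).count false * Wt G + Wt G := by
              rw [← hcnt]; ring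
            unfold Bnd at hB ⊢
            simp only [pv_stkW_cons, List.length_cons] at hB ⊢
            unfold Wt at *
            omega
        · -- already visited: advance
          apply ih
          · exact hv
          · exact hG
          · intro fr hfr
            rcases List.mem_cons.mp hfr with h1 | h1
            · subst h1
              intro j hj
              exact hS (i, neigh :: tl, res) (List.mem_cons_self) j (List.mem_cons_of_mem _ hj)
            · exact hS fr (List.mem_cons_of_mem _ h1)
          · unfold Bnd at hB ⊢
            simp only [pv_stkW_cons, List.length_cons] at hB ⊢
            omega

theorem pv_runB_any (G : List (List Int)) (m : List Bool) (f f' : Nat) (v z : List Bool)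
    (stk : List (Int × List Int × Bool)) (hv : v.length = G.length) (hG : RowsOK G)
    (hS : StkOK G.length stk) (h1 : Bnd G v stk ≤ f) (h2 : Bnd G v stk ≤ f') :
    runB G m f v z stk = runB G m f' v z stk := by
  have key : ∀ (d g : Nat), Bnd G v stk ≤ g → runB G m (g + d) v z stk = runB G m g v z stk := by
    intro d
    induction d with
    | zero => intro g _; rfl
    | succ d ih =>
      intro g hg
      have : g + (d + 1) = (g + d) + 1 := by omega
      rw [this, pv_runB_succ G m (g + d) v z stk hv hG hS (by omega), ih g hg]
  have e1 : f = Bnd G v stk + (f - Bnd G v stk) := by omega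
  have e2 : f' = Bnd G v stk + (f' - Bnd G v stk) := by omega
  rw [e1, e2, key _ _ (le_refl _), key _ _ (le_refl _)]


-- single machine steps, fuel kept at the canonical bound ------------------------------------
theorem pv_step_nil (G : List (List Int)) (m : List Bool) (v z : List Bool) (i : Int)
    (res : Bool) (stk : List (Int × List Int × Bool)) :
    runB G m (Bnd G v ((i, ([] : List Int), res) :: stk)) v z ((i, ([] : List Int), res) :: stk) =
      runB G m (Bnd G v (pushRes stk res)) v
        (if res = false then PySem.List.pySetD z i true else z) (pushRes stk res) := by
  have hb1 : Bnd G v ((i, ([] : List Int), res) :: stk) = Bnd G v (pushRes stk res) + 1 := by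
    unfold Bnd
    rw [pv_stkW_cons, pv_stkW_pushRes]
    simp only [List.length_nil]
    omega
  rw [hb1]
  cases stk with
  | nil => simp [runB, pushRes]
  | cons fr tl => obtain ⟨j, l, r⟩ := fr; simp [runB, pushRes]

theorem pv_step_skip (G : List (List Int)) (m : List Bool) (v z : List Bool) (i neigh : Int)
    (tl : List Int) (res : Bool) (stk : List (Int × List Int × Bool))
    (hv : v.length = G.length) (hG : RowsOK G)
    (hS : StkOK G.length ((i, neigh :: tl, res) :: stk))
    (hb : ¬ PySem.List.pyGetD v neigh false = false) :
    runB G m (Bnd G v ((i, neigh :: tl, res) :: stk)) v z ((i, neigh :: tl, res) :: stk) =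
      runB G m (Bnd G v ((i, tl, res) :: stk)) v z ((i, tl, res) :: stk) := by
  obtain ⟨b, hbnd⟩ : ∃ b, Bnd G v ((i, neigh :: tl, res) :: stk) = b + 1 :=
    ⟨Bnd G v ((i, neigh :: tl, res) :: stk) - 1, by unfold Bnd; rw [pv_stkW_cons]; omega⟩
  have hSt : StkOK G.length ((i, tl, res) :: stk) := by
    intro fr hfr
    rcases List.mem_cons.mp hfr with h1 | h1
    · subst h1
      intro j hj
      exact hS (i, neigh :: tl, res) (List.mem_cons_self) j (List.mem_cons_of_mem _ hj)
    · exact hS fr (List.mem_cons_of_mem _ h1)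
  rw [hbnd]
  simp only [runB]
  rw [if_neg hb]
  apply pv_runB_any G m b _ v z _ hv hG hSt
  · have := hbnd
    unfold Bnd at this ⊢
    simp only [pv_stkW_cons, List.length_cons] at this ⊢
    omega
  · exact le_refl _

theorem pv_step_push (G : List (List Int)) (m : List Bool) (v z : List Bool) (i neigh : Int)
    (tl : List Int) (res : Bool) (stk : List (Int × List Int × Bool))
    (hv : v.length = G.length) (hG : RowsOK G)
    (hS : StkOK G.length ((i, neigh :: tl, res) :: stk))
    (hneigh : InRj G.length neigh)
    (hb : PySem.List.pyGetD v neigh false = false) :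
    runB G m (Bnd G v ((i, neigh :: tl, res) :: stk)) v z ((i, neigh :: tl, res) :: stk) =
      runB G m
        (Bnd G (PySem.List.pySetD v neigh true)
          ((neigh, PySem.List.pyGetD G neigh [], PySem.List.pyGetD m neigh false) ::
            (i, tl, res) :: stk))
        (PySem.List.pySetD v neigh true) z
        ((neigh, PySem.List.pyGetD G neigh [], PySem.List.pyGetD m neigh false) ::
          (i, tl, res) :: stk) := by
  obtain ⟨b, hbnd⟩ : ∃ b, Bnd G v ((i, neigh :: tl, res) :: stk) = b + 1 :=
    ⟨Bnd G v ((i, neigh :: tl, res) :: stk) - 1, by unfold Bnd; rw [pv_stkW_cons]; omega⟩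
  have hSt : StkOK G.length
      ((neigh, PySem.List.pyGetD G neigh [], PySem.List.pyGetD m neigh false) ::
        (i, tl, res) :: stk) := by
    intro fr hfr
    rcases List.mem_cons.mp hfr with h1 | h1
    · subst h1
      intro j hj
      exact hG _ (pv_row_mem G neigh hneigh) j hj
    · rcases List.mem_cons.mp h1 with h2 | h2
      · subst h2
        intro j hj
        exact hS (i, neigh :: tl, res) (List.mem_cons_self) j (List.mem_cons_of_mem _ hj)
      · exact hS fr (List.mem_cons_of_mem _ h2)
  rw [hbnd]
  simp only [runB]
  rw [if_pos hb]
  apply pv_runB_any G m b _ _ z _ (by rw [pv_setD_len]; exact hv) hG hSt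
  · have hcnt : (PySem.List.pySetD v neigh true).count false + 1 = v.count false :=
      pv_setD_count v neigh (by rwa [hv]) hb
    have hrowle : (PySem.List.pyGetD G neigh []).length ≤ (G.map List.length).sum :=
      pv_row_le G _ (pv_row_mem G neigh hneigh)
    have hmul : v.count false * Wt G =
        (PySem.List.pySetD v neigh true).count false * Wt G + Wt G := by
      rw [← hcnt]; ring
    have := hbnd
    unfold Bnd at this ⊢
    simp only [pv_stkW_cons, List.length_cons] at this ⊢
    unfold Wt at *
    omega
  · exact le_refl _


-- the simulation: processing the top frame of the machine equals running A's loop ----------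
theorem pv_sim (G : List (List Int)) (m : List Bool) (hG : RowsOK G) :
    ∀ (kk f : Nat) (rest : List Int) (v z : List Bool) (res : Bool) (i : Int)
      (stk : List (Int × List Int × Bool)),
      v.count false ≤ kk → v.count false < f → v.length = G.length →
      RestOK G.length rest → StkOK G.length stk →
      runB G m (Bnd G v ((i, rest, res) :: stk)) v z ((i, rest, res) :: stk) =
        runB G m
          (Bnd G (loopA G m f v z rest res).1 (pushRes stk (loopA G m f v z rest res).2.2))
          (loopA G m f v z rest res).1
          (if (loopA G m f v z rest res).2.2 = false
            then PySem.List.pySetD (loopA G m f v z rest res).2.1 i true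
            else (loopA G m f v z rest res).2.1)
          (pushRes stk (loopA G m f v z rest res).2.2) := by
  intro kk
  induction kk with
  | zero =>
    intro f rest
    induction rest generalizing f with
    | nil =>
      intro v z res i stk hk hf hv hrest hstk
      simp only [loopA]
      exact pv_step_nil G m v z i res stk
    | cons neigh tl ihtl =>
      intro v z res i stk hk hf hv hrest hstk
      have hneigh : InRj G.length neigh := hrest neigh (List.mem_cons_self)
      by_cases hb : PySem.List.pyGetD v neigh false = false
      · exfalso
        have := pv_count_pos v neigh (by rwa [hv]) hb
        omega
      · have hstep := pv_step_skip G m v z i neigh tl res stk hv hG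
          (fun fr hfr => by
            rcases List.mem_cons.mp hfr with h1 | h1
            · subst h1; exact hrest
            · exact hstk fr h1) hb
        rw [hstep]
        simp only [loopA]
        rw [if_neg hb]
        exact ihtl f v z res i stk hk hf hv
          (fun j hj => hrest j (List.mem_cons_of_mem _ hj)) hstk
  | succ kk ih =>
    intro f rest
    induction rest generalizing f with
    | nil =>
      intro v z res i stk hk hf hv hrest hstk
      simp only [loopA]
      exact pv_step_nil G m v z i res stk
    | cons neigh tl ihtl =>
      intro v z res i stk hk hf hv hrest hstk
      have hneigh : InRj G.length neigh := hrest neigh (List.mem_cons_self)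
      have hSfull : StkOK G.length ((i, neigh :: tl, res) :: stk) := by
        intro fr hfr
        rcases List.mem_cons.mp hfr with h1 | h1
        · subst h1; exact hrest
        · exact hstk fr h1
      by_cases hb : PySem.List.pyGetD v neigh false = false
      · -- unvisited neighbour: descend
        have hcnt : (PySem.List.pySetD v neigh true).count false + 1 = v.count false :=
          pv_setD_count v neigh (by rwa [hv]) hb
        cases f with
        | zero => omega
        | succ g =>
          have hg : v.count false ≤ g := by omega
          have hg1 : 1 ≤ v.count false := pv_count_pos v neigh (by rwa [hv]) hb
          -- A side: unfold one loop step and the recursive call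
          simp only [loopA]
          rw [if_pos hb]
          simp only [dfsA]
          -- machine side: push step
          rw [pv_step_push G m v z i neigh tl res stk hv hG hSfull hneigh hb]
          -- abbreviations
          set v1 := PySem.List.pySetD v neigh true with hv1
          set row := PySem.List.pyGetD G neigh [] with hrow
          set res0 := PySem.List.pyGetD m neigh false with hres0
          set R := loopA G m g v1 z row res0 with hR
          have hmonoR := (pv_mono G m g).2 row v1 z res0
          rw [← hR] at hmonoR
          have hlen1 : v1.length = G.length := by rw [hv1, pv_setD_len]; exact hv
          -- inner IH: run the child's frame to completion
          have hinner := ih g row v1 z res0 neigh ((i, tl, res) :: stk)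
            (by omega) (by omega) hlen1
            (fun j hj => hG _ (pv_row_mem G neigh hneigh) j hj)
            (fun fr hfr => by
              rcases List.mem_cons.mp hfr with h1 | h1
              · subst h1
                intro j hj
                exact hrest j (List.mem_cons_of_mem _ hj)
              · exact hstk fr h1)
          rw [← hR] at hinner
          rw [hinner]
          -- continuation IH: process the rest of the parent's neighbours
          set Z1 := if R.2.2 = false then PySem.List.pySetD R.2.1 neigh true else R.2.1 with hZ1
          have hcont := ih (g + 1) tl R.1 Z1 (res || R.2.2) i stk
            (by omega) (by omega) (by rw [hmonoR.1]; exact hlen1)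
            (fun j hj => hrest j (List.mem_cons_of_mem _ hj)) hstk
          have hpush : pushRes ((i, tl, res) :: stk) R.2.2 = (i, tl, res || R.2.2) :: stk := rfl
          rw [hpush, hcont]
          -- reconcile the or-accumulator order
          have hor : loopA G m (g + 1) R.1 Z1 tl (res || R.2.2) =
              loopA G m (g + 1) R.1 Z1 tl (R.2.2 || res) := by
            rw [pv_loop_or G m (g + 1) tl R.1 Z1 (res || R.2.2),
              pv_loop_or G m (g + 1) tl R.1 Z1 (R.2.2 || res), Bool.or_comm res]
          rw [hor]
      · -- visited neighbour: skip
        have hstep := pv_step_skip G m v z i neigh tl res stk hv hG hSfull hb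
        rw [hstep]
        simp only [loopA]
        rw [if_neg hb]
        exact ihtl f v z res i stk hk hf hv
          (fun j hj => hrest j (List.mem_cons_of_mem _ hj)) hstk

-- ===== VERDICT (by name: the statement is the Claim_ definition above) =====
theorem obetnij_to_gowno_spec : Claim_equal_obetnij_to_gowno := by
  intro G miasta hDom hPre
  obtain ⟨hn, hm, hrows⟩ := hPre
  have hG : RowsOK G := fun row hr j hj => hrows row hr j hj
  unfold Spec_obetnij_to_gowno obetnij_to_gowno obetnij_to_gowno_alt
  simp only []
  have h0 : InRj G.length 0 := ⟨by omega, by exact_mod_cast hn⟩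
  have hlen1 : (PySem.List.pySetD (List.replicate G.length false) 0 true).length = G.length := by
    rw [pv_setD_len, List.length_replicate]
  have hc : (PySem.List.pySetD (List.replicate G.length false) 0 true).count false + 1 =
      G.length := by
    obtain ⟨k, hk⟩ := Nat.exists_eq_succ_of_ne_zero (Nat.pos_iff_ne_zero.mp hn)
    have hset : PySem.List.pySetD (List.replicate G.length false) 0 true
        = (List.replicate G.length false).set 0 true := by
      unfold PySem.List.pySetD PySem.List.pySet? PySem.List.pyIdx?
      simp [hk]
    rw [hset, hk, List.replicate_succ]
    simp
  have hrow0 : PySem.List.pyGetD G 0 [] ∈ G := pv_row_mem G 0 h0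
  have hrest0 : RestOK G.length (PySem.List.pyGetD G 0 []) := fun j hj => hG _ hrow0 j hj
  have hstk0 : StkOK G.length
      [((0 : Int), PySem.List.pyGetD G 0 [], PySem.List.pyGetD miasta 0 false)] := by
    intro fr hfr
    rcases List.mem_cons.mp hfr with h1 | h1
    · subst h1; exact hrest0
    · simp at h1
  have hfuel : Bnd G (PySem.List.pySetD (List.replicate G.length false) 0 true)
        [((0 : Int), PySem.List.pyGetD G 0 [], PySem.List.pyGetD miasta 0 false)] ≤
      G.length * (2 * (G.map List.length).sum + 3) + 2 * (G.map List.length).sum + 1 := by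
    have h1 : (PySem.List.pySetD (List.replicate G.length false) 0 true).count false * Wt G ≤
        G.length * Wt G := Nat.mul_le_mul_right _ (by omega)
    have h2 : (PySem.List.pyGetD G 0 []).length ≤ (G.map List.length).sum :=
      pv_row_le G _ hrow0
    unfold Bnd
    rw [pv_stkW_cons]
    unfold Wt at h1 ⊢
    simp only [stkW, List.foldr]
    omega
  rw [pv_runB_any G miasta _
      (Bnd G (PySem.List.pySetD (List.replicate G.length false) 0 true)
        [((0 : Int), PySem.List.pyGetD G 0 [], PySem.List.pyGetD miasta 0 false)])
      _ _ _ hlen1 hG hstk0 hfuel (le_refl _)]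
  -- unfold the single call DFS_visit(G, 0) on the A side
  simp only [dfsA]
  rw [pv_sim G miasta hG
      ((PySem.List.pySetD (List.replicate G.length false) 0 true).count false) G.length
      (PySem.List.pyGetD G 0 []) (PySem.List.pySetD (List.replicate G.length false) 0 true)
      (List.replicate G.length false) (PySem.List.pyGetD miasta 0 false) 0 []
      (le_refl _) (by omega) hlen1 hrest0 (fun fr hfr => by simp at hfr)]
  simp only [pushRes]
  rw [pv_runB_nil]
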